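-- pv_equiv track=rewrite | github.com/sfegan/imessage_to_gmail | file_finder.py | make_fast_find
-- ===== SOURCE A (Python) =====
-- def make_fast_find(mdbd):
--     index = dict()
--     for imdbd in mdbd:
--         fn = mdbd[imdbd]['filename']
--         len_fn = len(fn)
--         if(len_fn not in index):
--             index[len_fn] = dict()
--         index[len_fn][fn] = mdbd[imdbd]['fileID']
--     return index
-- ===== SOURCE B (Python) =====
-- def make_fast_find(mdbd):
--     records = list(mdbd.values())
--     lengths = list(dict.fromkeys(len(r['filename']) for r in records))
--     return {L: {r['filename']: r['fileID'] for r in records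
--                 if len(r['filename']) == L}
--             for L in lengths}
-- ===== Notes on version B (the rewrite author's own statement) =====
-- stated objective: alternative
-- what changed: A scatters records into a nested dict in one mutating pass; B first computes the distinct filename lengths in order of first occurrence and then builds each length's inner dict by a separate filtered comprehension over the records.
import Mathlib
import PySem

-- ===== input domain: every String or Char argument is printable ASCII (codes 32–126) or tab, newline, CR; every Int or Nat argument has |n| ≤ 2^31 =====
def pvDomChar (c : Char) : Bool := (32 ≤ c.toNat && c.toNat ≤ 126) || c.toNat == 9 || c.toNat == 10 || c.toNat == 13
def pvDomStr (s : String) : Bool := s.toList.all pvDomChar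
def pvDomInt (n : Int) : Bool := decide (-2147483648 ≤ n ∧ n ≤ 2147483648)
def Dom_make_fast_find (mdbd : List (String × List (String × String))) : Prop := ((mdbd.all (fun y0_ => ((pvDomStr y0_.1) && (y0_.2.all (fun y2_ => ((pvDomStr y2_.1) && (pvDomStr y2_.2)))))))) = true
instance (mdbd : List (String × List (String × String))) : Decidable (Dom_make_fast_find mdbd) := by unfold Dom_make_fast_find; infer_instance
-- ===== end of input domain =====

-- B builds the same length-keyed index by a different decomposition: it first collects the
-- distinct filename lengths in first-occurrence order, then builds each length's inner dict
-- by a separate filtered pass over the records, instead of A's single scattering pass that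
-- mutates a nested dict (objective: alternative; no speed claim).


-- record field lookups, used by both ports just as both Pythons write r['filename'] / r['fileID']
-- (getD with a dummy default is the sanctioned total form: Pre_ guarantees the key is present)
def pvFilename (r : List (String × String)) : String := (PySem.Dict.ofList r).getD "filename" ""
def pvFileID (r : List (String × String)) : String := (PySem.Dict.ofList r).getD "fileID" ""

-- ===== PORT A =====
-- literal transliteration of A: one pass over the dict's keys, scattering into a nested dict
def make_fast_find (mdbd : List (String × List (String × String))) : List (Int × List (String × String)) :=
  let md := PySem.Dict.ofList mdbd
  let index : PySem.Dict Int (PySem.Dict String String) :=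
    md.keys.foldl (fun index imdbd =>
      let fn := pvFilename (md.getD imdbd [])
      let len_fn : Int := PySem.Str.len fn
      let index := if index.contains len_fn then index else index.insert len_fn PySem.Dict.empty
      index.insert len_fn ((index.getD len_fn PySem.Dict.empty).insert fn (pvFileID (md.getD imdbd []))))
      PySem.Dict.empty
  index.items.map (fun p => (p.1, p.2.items))

-- ===== PORT B =====
-- literal transliteration of B: distinct lengths (ordered dedup = dict.fromkeys), then one
-- filtered dict-comprehension over the records per length
def make_fast_find_alt (mdbd : List (String × List (String × String))) : List (Int × List (String × String)) :=
  let records := (PySem.Dict.ofList mdbd).values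
  let lengths := PySem.List.dedup (records.map (fun r => PySem.Str.len (pvFilename r)))
  lengths.map (fun L =>
    (L, ((records.filter (fun r => PySem.Str.len (pvFilename r) == L)).foldl
          (fun (d : PySem.Dict String String) r => d.insert (pvFilename r) (pvFileID r))
          PySem.Dict.empty).items))

-- ===== PRECONDITION & SPEC =====
-- Pre_ excludes exactly the inputs on which Python A raises KeyError: a record of the dict
-- that mdbd denotes lacking the key 'filename' or the key 'fileID'.
def Pre_make_fast_find (mdbd : List (String × List (String × String))) : Prop :=
  ∀ p ∈ (PySem.Dict.ofList mdbd).items,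
    "filename" ∈ p.2.map Prod.fst ∧ "fileID" ∈ p.2.map Prod.fst
instance (mdbd : List (String × List (String × String))) : Decidable (Pre_make_fast_find mdbd) := by unfold Pre_make_fast_find; infer_instance
def pvWitness_make_fast_find : (List (String × List (String × String))) :=
  [("1", [("filename", "a.png"), ("fileID", "F1")]), ("2", [("filename", "b"), ("fileID", "F2")])]

def Spec_make_fast_find (mdbd : List (String × List (String × String))) (out : List (Int × List (String × String))) : Prop := out = make_fast_find_alt mdbd
instance (mdbd : List (String × List (String × String))) (out : List (Int × List (String × String))) : Decidable (Spec_make_fast_find mdbd out) := by unfold Spec_make_fast_find; infer_instance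

-- ===== CLAIM (what is proved, stated in full; the proofs are below) =====
def Claim_equal_make_fast_find : Prop := ∀ (mdbd : List (String × List (String × String))), Dom_make_fast_find mdbd → Pre_make_fast_find mdbd → Spec_make_fast_find mdbd (make_fast_find mdbd)

-- ===== LEMMAS AND PROOFS =====

-- A's loop body is exactly a Dict.modify at the length key
theorem step_eq_modify (index : PySem.Dict Int (PySem.Dict String String))
    (K : Int) (fn fid : String) :
    (let index' := if index.contains K then index else index.insert K PySem.Dict.empty
     index'.insert K ((index'.getD K PySem.Dict.empty).insert fn fid))
    = index.modify K PySem.Dict.empty (fun inner => inner.insert fn fid) := by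
  by_cases h : index.contains K
  · rw [PySem.Dict.modify]
    simp only [h, if_true]
  · rw [PySem.Dict.modify]
    simp only [Bool.not_eq_true] at h
    simp only [h, Bool.false_eq_true, if_false]
    rw [PySem.Dict.getD_insert_self, PySem.Dict.insert_insert_self,
      PySem.Dict.getD_of_not_contains _ _ h]

-- lookup in the grouping fold: the inner dict at K is the insert-fold over the records of length K
theorem getD_groupfold {R : Type} (k : R -> Int) (f v : R -> String) (l : List R)
    (d : PySem.Dict Int (PySem.Dict String String)) (K : Int) :
    (l.foldl (fun d r => d.modify (k r) PySem.Dict.empty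
        (fun inner => inner.insert (f r) (v r))) d).getD K PySem.Dict.empty
    = (l.filter (fun r => k r == K)).foldl
        (fun (inner : PySem.Dict String String) r => inner.insert (f r) (v r))
        (d.getD K PySem.Dict.empty) := by
  induction l generalizing d with
  | nil => rfl
  | cons r l ih =>
    simp only [List.foldl_cons, List.filter_cons, ih, PySem.Dict.getD_modify]
    by_cases h : k r = K
    · simp [h]
    · simp [h, Ne.symm h]

-- the whole grouping fold, rendered as B renders it
theorem fold_items_eq {R : Type} (k : R -> Int) (f v : R -> String) (records : List R) :
    ((records.foldl (fun d r => d.modify (k r) PySem.Dict.empty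
        (fun inner => inner.insert (f r) (v r))) PySem.Dict.empty).items).map
      (fun p => (p.1, p.2.items))
    = (PySem.List.dedup (records.map k)).map (fun L =>
        (L, ((records.filter (fun r => k r == L)).foldl
              (fun (d : PySem.Dict String String) r => d.insert (f r) (v r))
              PySem.Dict.empty).items)) := by
  have hnd := PySem.Dict.nodup_keys_foldl_modify_key records k PySem.Dict.empty
    (fun _ r => fun inner => inner.insert (f r) (v r)) PySem.Dict.empty
    PySem.Dict.nodup_keys_empty
  rw [PySem.Dict.items_eq_map_keys _ hnd PySem.Dict.empty, List.map_map,
      PySem.Dict.keys_foldl_modify_key, PySem.Dict.keys_empty, PySem.Set.update_nil_left,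
      ← PySem.List.dedup_eq_ofList]
  refine List.map_congr_left ?_
  intro L _
  simp only [Function.comp_apply]
  rw [getD_groupfold k f v records PySem.Dict.empty L, PySem.Dict.getD_empty]

-- ===== VERDICT (by name: the statement is the Claim_ definition above) =====
theorem make_fast_find_spec : Claim_equal_make_fast_find := by
  intro mdbd _ _
  unfold Spec_make_fast_find make_fast_find make_fast_find_alt
  set md := PySem.Dict.ofList mdbd with hmd
  -- A's fold over keys with lookup = the same fold over the values
  have hvals : md.values = md.keys.map (fun k => md.getD k []) :=
    PySem.Dict.values_eq_map_keys md (PySem.Dict.nodup_keys_ofList mdbd) []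
  simp only [hvals]
  -- rewrite A's loop body as a modify
  have hbody :
      (fun (index : PySem.Dict Int (PySem.Dict String String)) imdbd =>
        let fn := pvFilename (md.getD imdbd [])
        let len_fn : Int := PySem.Str.len fn
        let index := if index.contains len_fn then index else index.insert len_fn PySem.Dict.empty
        index.insert len_fn ((index.getD len_fn PySem.Dict.empty).insert fn (pvFileID (md.getD imdbd []))))
      = fun index imdbd => (fun index r => index.modify (PySem.Str.len (pvFilename r)) PySem.Dict.empty
          (fun inner => inner.insert (pvFilename r) (pvFileID r))) index (md.getD imdbd []) := by
    funext index imdbd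
    exact step_eq_modify index _ _ _
  rw [hbody]
  beta_reduce
  simp only [List.map_map, List.filter_map, List.foldl_map, Function.comp_def]
  exact fold_items_eq (fun key => PySem.Str.len (pvFilename (md.getD key [])))
    (fun key => pvFilename (md.getD key [])) (fun key => pvFileID (md.getD key [])) md.keys
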